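-- pv_equiv track=rewrite | github.com/snhr-1019/competitive-programming | GoogleCodeJam/2022/Round1C/LetterBlocks/main.py | is_mega
-- ===== SOURCE A (Python) =====
-- def is_mega(s):
--     cur = s[0]
--     appeared = set()
--     for i in range(1, len(s)):
--         if s[i] == cur:
--             continue
--
--         if s[i] in appeared:
--             return False
--
--         appeared.add(cur)
--         cur = s[i]
--     return True
-- ===== SOURCE B (Python) =====
-- def is_mega(s):
--     # Structural recursion: strip the maximal leading run of s[0]; that character
--     # must never occur again in the remainder, which must itself be mega.
--     if not s:
--         return True
--     head = s[0]
--     rest = s.lstrip(head)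
--     return head not in rest and is_mega(rest)
-- ===== Notes on version B (the rewrite author's own statement) =====
-- stated objective: simpler
-- what changed: A's single stateful pass that remembers past run-characters in a set is replaced by structural recursion with no auxiliary state: strip the maximal leading run with lstrip and require its character absent from the remainder, then recurse on the remainder.
import Mathlib
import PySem

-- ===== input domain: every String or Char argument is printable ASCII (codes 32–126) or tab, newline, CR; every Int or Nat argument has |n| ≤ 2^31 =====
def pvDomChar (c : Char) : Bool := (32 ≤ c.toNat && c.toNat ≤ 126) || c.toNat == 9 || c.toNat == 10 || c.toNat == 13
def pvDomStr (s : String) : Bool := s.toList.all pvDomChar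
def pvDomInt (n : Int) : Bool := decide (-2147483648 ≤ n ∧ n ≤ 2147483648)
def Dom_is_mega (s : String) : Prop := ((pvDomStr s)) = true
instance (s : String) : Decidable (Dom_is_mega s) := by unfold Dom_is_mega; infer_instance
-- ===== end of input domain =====

-- B replaces A's stateful pass (cur + 'appeared' set) by stateless structural recursion
-- (strip leading run, forward membership check, recurse); B returns True on "" where A raises.


-- ===== PORT A =====
-- loop over the characters after the first, with state (cur, appeared)
def isMegaLoop : List Char → Char → PySem.Set Char → Bool
  | [], _, _ => true
  | c :: rest, cur, appeared =>
    if c == cur then isMegaLoop rest cur appeared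
    else if PySem.Set.contains appeared c then false
    else isMegaLoop rest c (PySem.Set.add appeared cur)

def is_mega (s : String) : Bool :=
  match s.toList with
  | [] => false   -- Python raises IndexError at s[0]; excluded by Pre_is_mega
  | c :: rest => isMegaLoop rest c PySem.Set.empty

-- ===== PORT B =====
-- if not s: return True; head = s[0]; rest = s.lstrip(head); return head not in rest and is_mega(rest)
def isMegaAltGo : List Char → Bool
  | [] => true
  | c :: t =>
    let rest := t.dropWhile (· == c)    -- s.lstrip(head): drop all leading copies of c
    !(rest.contains c) && isMegaAltGo rest
termination_by cs => cs.length
decreasing_by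
  have h := List.length_dropWhile_le (· == c) t
  simp only [List.length_cons]
  omega

def is_mega_alt (s : String) : Bool := isMegaAltGo s.toList

-- ===== PRECONDITION & SPEC =====
-- Pre_ excludes only the empty string, on which A raises IndexError (s[0]).
def Pre_is_mega (s : String) : Prop := s ≠ ""
instance (s : String) : Decidable (Pre_is_mega s) := by unfold Pre_is_mega; infer_instance
def pvWitness_is_mega : String := "aabba"

def Spec_is_mega (s : String) (out : Bool) : Prop := out = is_mega_alt s
instance (s : String) (out : Bool) : Decidable (Spec_is_mega s out) := by unfold Spec_is_mega; infer_instance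

-- ===== CLAIM (what is proved, stated in full; the proofs are below) =====
def Claim_equal_is_mega : Prop := ∀ (s : String), Dom_is_mega s → Pre_is_mega s → Spec_is_mega s (is_mega s)

-- ===== LEMMAS AND PROOFS =====

-- the first character of each maximal run, after a run of `cur`
def runsAux : Char → List Char → List Char
  | _, [] => []
  | cur, c :: rest => if c = cur then runsAux cur rest else c :: runsAux c rest

-- the first character of each maximal run of a list
def runsL : List Char → List Char
  | [] => []
  | c :: rest => c :: runsAux c rest

theorem isMegaLoop_iff (rest : List Char) (cur : Char) (app : PySem.Set Char)
    (hnd : app.Nodup) (hcur : cur ∉ app) :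
    isMegaLoop rest cur app = true ↔ (app ++ cur :: runsAux cur rest).Nodup := by
  induction rest generalizing cur app with
  | nil =>
    constructor
    · intro _
      have h0 : runsAux cur [] = [] := rfl
      rw [h0]
      simp only [List.nodup_append]
      exact ⟨hnd, List.nodup_singleton cur,
        fun a ha b hb he => hcur (by rw [he, List.mem_singleton.mp hb] at ha; exact ha)⟩
    · intro _; rfl
  | cons c rest ih =>
    by_cases hc : c = cur
    · subst hc
      have hrw : runsAux c (c :: rest) = runsAux c rest := by simp [runsAux]
      rw [show isMegaLoop (c :: rest) c app = isMegaLoop rest c app from by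
        simp [isMegaLoop], hrw]
      exact ih c app hnd hcur
    · simp only [isMegaLoop, beq_iff_eq, hc, if_false]
      have hrw : runsAux cur (c :: rest) = c :: runsAux c rest := by simp [runsAux, hc]
      rw [hrw]
      by_cases hmem : c ∈ app
      · rw [if_pos (by simpa [PySem.Set.contains_iff] using hmem)]
        simp only [Bool.false_eq_true, false_iff]
        intro hn
        simp only [List.nodup_append] at hn
        exact hn.2.2 c hmem c (by simp) rfl
      · rw [if_neg (by simpa [PySem.Set.contains_iff] using hmem)]
        rw [ih c (PySem.Set.add app cur)
          (PySem.Set.nodup_add _ _ hnd)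
          (by
            intro hin
            rcases (PySem.Set.mem_add _ _ _).mp hin with h' | h'
            · exact hmem h'
            · exact hc h')]
        rw [PySem.Set.add_of_not_mem hcur, List.append_assoc]
        rfl

theorem mem_of_mem_runsAux (d cur : Char) (xs : List Char) (h : d ∈ runsAux cur xs) : d ∈ xs := by
  induction xs generalizing cur with
  | nil => simp [runsAux] at h
  | cons x t ih =>
    by_cases hx : x = cur
    · simp only [runsAux, hx, if_true] at h
      exact List.mem_cons_of_mem x (ih cur h)
    · simp only [runsAux, hx, if_false, List.mem_cons] at h
      rcases h with h | h
      · exact h ▸ List.mem_cons_self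
      · exact List.mem_cons_of_mem x (ih x h)

theorem mem_runsAux_of_mem (d cur : Char) (xs : List Char) (h : d ∈ xs) :
    d = cur ∨ d ∈ runsAux cur xs := by
  induction xs generalizing cur with
  | nil => simp at h
  | cons x t ih =>
    rcases List.mem_cons.mp h with h | h
    · by_cases hx : x = cur
      · exact Or.inl (h.trans hx)
      · exact Or.inr (by simp [runsAux, hx, h])
    · by_cases hx : x = cur
      · simpa [runsAux, hx] using ih cur h
      · rcases ih x h with h' | h'
        · exact Or.inr (by simp [runsAux, hx, h'])
        · exact Or.inr (by simp [runsAux, hx, h'])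

theorem mem_runsL (d : Char) (r : List Char) : d ∈ runsL r ↔ d ∈ r := by
  cases r with
  | nil => simp [runsL]
  | cons x t =>
    show d ∈ x :: runsAux x t ↔ d ∈ x :: t
    constructor
    · intro h
      rcases List.mem_cons.mp h with h | h
      · exact h ▸ List.mem_cons_self
      · exact List.mem_cons_of_mem x (mem_of_mem_runsAux d x t h)
    · intro h
      rcases List.mem_cons.mp h with h | h
      · exact List.mem_cons.mpr (Or.inl h)
      · rcases mem_runsAux_of_mem d x t h with h' | h'
        · exact List.mem_cons.mpr (Or.inl h')
        · exact List.mem_cons.mpr (Or.inr h')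

theorem runsAux_dropWhile (c : Char) (t : List Char) :
    runsAux c t = runsL (t.dropWhile (· == c)) := by
  induction t with
  | nil => rfl
  | cons x t ih =>
    by_cases hx : x = c
    · simpa [runsAux, hx, List.dropWhile] using ih
    · simp [runsAux, hx, runsL]

theorem altGo_iff : ∀ (n : ℕ) (cs : List Char), cs.length ≤ n →
    (isMegaAltGo cs = true ↔ (runsL cs).Nodup) := by
  intro n
  induction n with
  | zero =>
    intro cs h
    have : cs = [] := List.eq_nil_of_length_eq_zero (Nat.le_zero.mp h)
    subst this
    simp [isMegaAltGo, runsL]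
  | succ n ih =>
    intro cs h
    cases cs with
    | nil => simp [isMegaAltGo, runsL]
    | cons c t =>
      have hlen : (t.dropWhile (· == c)).length ≤ n := by
        have := List.length_dropWhile_le (· == c) t
        simp only [List.length_cons] at h
        omega
      rw [show isMegaAltGo (c :: t)
            = (!((t.dropWhile (· == c)).contains c) && isMegaAltGo (t.dropWhile (· == c)))
          from by rw [isMegaAltGo]]
      rw [show runsL (c :: t) = c :: runsL (t.dropWhile (· == c)) from by
        rw [show runsL (c :: t) = c :: runsAux c t from rfl, runsAux_dropWhile]]
      rw [List.nodup_cons, Bool.and_eq_true, ih _ hlen, mem_runsL]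
      simp [List.contains_eq_mem]

-- ===== VERDICT (by name: the statement is the Claim_ definition above) =====
theorem is_mega_spec : Claim_equal_is_mega := by
  intro s _ hpre
  unfold Spec_is_mega
  have hne : s.toList ≠ [] := by
    intro h
    exact hpre (by rwa [← String.toList_eq_nil_iff])
  obtain ⟨c, rest, hcs⟩ := List.exists_cons_of_ne_nil hne
  rw [Bool.eq_iff_iff]
  have hA : is_mega s = true ↔ (c :: runsAux c rest).Nodup := by
    unfold is_mega
    rw [hcs]
    simpa using isMegaLoop_iff rest c PySem.Set.empty (by simp [PySem.Set.empty])
      (by simp [PySem.Set.empty])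
  have hB : is_mega_alt s = true ↔ (c :: runsAux c rest).Nodup := by
    unfold is_mega_alt
    rw [hcs]
    exact altGo_iff (c :: rest).length (c :: rest) le_rfl
  rw [hA, hB]
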